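-- pv_equiv track=rewrite | github.com/jonkmatsumo/text2sql | src/agent/nodes/validate.py | _parse_column_allowlist
-- ===== SOURCE A (Python) =====
-- from typing import Dict, Optional, Set, Tuple
--
-- def _parse_column_allowlist(raw_allowlist: Optional[str]) -> Dict[str, Set[str]]:
--     columns: Dict[str, Set[str]] = {}
--     if not raw_allowlist:
--         return columns
--
--     for item in raw_allowlist.split(","):
--         normalized = item.strip().lower()
--         if not normalized:
--             continue
--         if "." not in normalized:
--             continue
--         table_name, column_name = normalized.split(".", 1)
--         table_name = table_name.strip()
--         column_name = column_name.strip()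
--         if not table_name or not column_name:
--             continue
--         columns.setdefault(table_name, set()).add(column_name)
--     return columns
-- ===== SOURCE B (Python) =====
-- from typing import Dict, Optional, Set, Tuple
--
--
-- def _pair(item: str) -> Optional[Tuple[str, str]]:
--     normalized = item.strip().lower()
--     if "." not in normalized:
--         return None
--     table_name, _, column_name = normalized.partition(".")
--     table_name = table_name.strip()
--     column_name = column_name.strip()
--     return (table_name, column_name) if table_name and column_name else None
--
--
-- def _parse_column_allowlist(raw_allowlist: Optional[str]) -> Dict[str, Set[str]]:
--     pairs = [p for p in map(_pair, (raw_allowlist or "").split(",")) if p is not None]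
--     tables = list(dict.fromkeys(t for t, _ in pairs))
--     return {t: {c for t2, c in pairs if t2 == t} for t in tables}
-- ===== Notes on version B (the rewrite author's own statement) =====
-- stated objective: alternative
-- what changed: Replaces the fused loop that accumulates a dict of sets via setdefault/add with a three-stage pipeline: a filterMap pass extracting valid (table, column) pairs, an ordered dedup of the table names, and a per-table grouping scan building each column set; no dict is maintained during the scan.
import Mathlib
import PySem

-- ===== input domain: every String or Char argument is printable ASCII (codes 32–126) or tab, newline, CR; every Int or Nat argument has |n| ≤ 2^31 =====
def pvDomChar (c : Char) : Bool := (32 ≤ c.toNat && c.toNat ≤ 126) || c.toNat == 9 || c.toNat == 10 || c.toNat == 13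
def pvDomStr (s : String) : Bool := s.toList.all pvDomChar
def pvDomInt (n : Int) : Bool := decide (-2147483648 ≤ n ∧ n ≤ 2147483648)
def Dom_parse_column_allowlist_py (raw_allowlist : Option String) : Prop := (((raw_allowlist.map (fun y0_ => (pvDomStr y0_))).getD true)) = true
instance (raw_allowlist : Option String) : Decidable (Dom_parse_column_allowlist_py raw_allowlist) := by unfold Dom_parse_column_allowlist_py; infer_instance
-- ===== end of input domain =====

-- B replaces A's fused dict-of-sets accumulation with a parse(filterMap)/dedup/group-by-table pipeline; objective: alternative decomposition.

-- ===== PORT A =====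
-- loop body of A: strip+lower, skip empties and dot-less items, split on the first '.',
-- strip the two parts, skip if either is empty, else columns.setdefault(table, set()).add(column)
def pvStepA (d : PySem.Dict String (PySem.Set String)) (item : List Char) :
    PySem.Dict String (PySem.Set String) :=
  let normalized := PySem.Chars.lower (PySem.Chars.strip item)
  if normalized.isEmpty then d
  else if !(PySem.Chars.isIn ['.'] normalized) then d
  else
    match PySem.Chars.splitOnMax normalized ['.'] 1 with
    | [t0, c0] =>
      let table_name := PySem.Chars.strip t0
      let column_name := PySem.Chars.strip c0
      if table_name.isEmpty || column_name.isEmpty then d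
      else d.modify (String.ofList table_name) PySem.Set.empty
             (fun s => s.add (String.ofList column_name))
    | _ => d  -- unreachable: split(".", 1) yields two parts when "." occurs

def parse_column_allowlist_py (raw_allowlist : Option String) : List (String × List String) :=
  match raw_allowlist with
  | none => (PySem.Dict.empty (κ := String) (ν := PySem.Set String)).items
  | some s =>
    if s.toList.isEmpty then (PySem.Dict.empty (κ := String) (ν := PySem.Set String)).items
    else ((PySem.Chars.splitOn s.toList [',']).foldl pvStepA PySem.Dict.empty).items

-- ===== PORT B =====
-- helper _pair of Source B: the item's valid (table, column) pair, or none
def pvPair (item : List Char) : Option (String × String) :=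
  let normalized := PySem.Chars.lower (PySem.Chars.strip item)
  if !(PySem.Chars.isIn ['.'] normalized) then none
  else
    match PySem.Chars.splitOnMax normalized ['.'] 1 with  -- partition(".") with "." present
    | [t0, c0] =>
      let table_name := PySem.Chars.strip t0
      let column_name := PySem.Chars.strip c0
      if table_name.isEmpty || column_name.isEmpty then none
      else some (String.ofList table_name, String.ofList column_name)
    | _ => none

def parse_column_allowlist_py_alt (raw_allowlist : Option String) : List (String × List String) :=
  let s := raw_allowlist.getD ""  -- (raw_allowlist or "")
  let pairs := (PySem.Chars.splitOn s.toList [',']).filterMap pvPair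
  let tables := PySem.List.dedup (pairs.map (·.1))  -- dict.fromkeys ordered dedup
  tables.map (fun t => (t, PySem.Set.ofList ((pairs.filter (fun p => p.1 == t)).map (·.2))))

-- ===== PRECONDITION & SPEC =====
def Spec_parse_column_allowlist_py (raw_allowlist : Option String) (out : List (String × List String)) : Prop := out = parse_column_allowlist_py_alt raw_allowlist
instance (raw_allowlist : Option String) (out : List (String × List String)) : Decidable (Spec_parse_column_allowlist_py raw_allowlist out) := by unfold Spec_parse_column_allowlist_py; infer_instance

-- ===== CLAIM (what is proved, stated in full; the proofs are below) =====
def Claim_equal_parse_column_allowlist_py : Prop := ∀ (raw_allowlist : Option String), Dom_parse_column_allowlist_py raw_allowlist → Spec_parse_column_allowlist_py raw_allowlist (parse_column_allowlist_py raw_allowlist)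

-- ===== LEMMAS AND PROOFS =====

-- the pure pair-indexed step B's pipeline is compared against
def pvStepP (d : PySem.Dict String (PySem.Set String)) (p : String × String) :
    PySem.Dict String (PySem.Set String) :=
  d.modify p.1 PySem.Set.empty (fun s => s.add p.2)

theorem pvStepA_eq (d : PySem.Dict String (PySem.Set String)) (item : List Char) :
    pvStepA d item = match pvPair item with
      | none => d
      | some p => pvStepP d p := by
  unfold pvStepA pvPair pvStepP
  by_cases h : (PySem.Chars.lower (PySem.Chars.strip item)).isEmpty
  · have h' : PySem.Chars.lower (PySem.Chars.strip item) = [] := by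
      simpa using h
    simp only [h']
    rw [show PySem.Chars.isIn ['.'] [] = false by decide]
    simp
  · simp only [h, if_false, Bool.false_eq_true]
    split <;> rename_i hin
    · simp
    · split <;> simp_all
      split <;> simp_all

theorem pvFold_filterMap (items : List (List Char)) (d : PySem.Dict String (PySem.Set String)) :
    items.foldl pvStepA d = (items.filterMap pvPair).foldl pvStepP d := by
  induction items generalizing d with
  | nil => rfl
  | cons x xs ih =>
    simp only [List.foldl_cons, List.filterMap_cons]
    rw [pvStepA_eq]
    cases pvPair x <;> simp [ih]

theorem pvGetD_fold (ps : List (String × String)) (d : PySem.Dict String (PySem.Set String))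
    (t : String) :
    (ps.foldl pvStepP d).getD t PySem.Set.empty
      = PySem.Set.update (d.getD t PySem.Set.empty)
          ((ps.filter (fun p => p.1 == t)).map (·.2)) := by
  induction ps generalizing d with
  | nil => rfl
  | cons p ps ih =>
    simp only [List.foldl_cons, List.filter_cons]
    by_cases h : p.1 = t
    · simp only [h, beq_self_eq_true, if_pos, List.map_cons]
      rw [ih]
      have : (pvStepP d p).getD t PySem.Set.empty
          = PySem.Set.add (d.getD t PySem.Set.empty) p.2 := by
        unfold pvStepP
        rw [PySem.Dict.modify, h, PySem.Dict.getD_insert_self]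
      rw [this]
      rfl
    · have hb : (p.1 == t) = false := by simp [h]
      simp only [hb, Bool.false_eq_true, if_false]
      rw [ih]
      have : (pvStepP d p).getD t PySem.Set.empty = d.getD t PySem.Set.empty := by
        unfold pvStepP
        rw [PySem.Dict.modify, PySem.Dict.getD_insert_of_ne _ _ _ (fun he => h he.symm)]
      rw [this]

theorem pvItems_fold (ps : List (String × String)) :
    (ps.foldl pvStepP PySem.Dict.empty).items
      = (PySem.List.dedup (ps.map (·.1))).map
          (fun t => (t, PySem.Set.ofList ((ps.filter (fun p => p.1 == t)).map (·.2)))) := by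
  have hkeys : (ps.foldl pvStepP PySem.Dict.empty).keys
      = PySem.Set.update (PySem.Dict.empty (κ := String) (ν := PySem.Set String)).keys
          (ps.map (·.1)) := by
    have := PySem.Dict.keys_foldl_modify_key ps (fun p : String × String => p.1)
      (PySem.Set.empty (α := String)) (fun _ p s => s.add p.2) PySem.Dict.empty
    simpa [pvStepP] using this
  have hnd : (ps.foldl pvStepP PySem.Dict.empty).keys.Nodup := by
    have := PySem.Dict.nodup_keys_foldl_modify_key ps (fun p : String × String => p.1)
      (PySem.Set.empty (α := String)) (fun _ p s => s.add p.2)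
      (PySem.Dict.empty (κ := String) (ν := PySem.Set String)) (by simp [PySem.Dict.empty])
    simpa [pvStepP] using this
  rw [PySem.Dict.items_eq_map_keys _ hnd PySem.Set.empty, hkeys]
  have hdd : PySem.Set.update (PySem.Dict.empty (κ := String) (ν := PySem.Set String)).keys
      (ps.map (·.1)) = PySem.List.dedup (ps.map (·.1)) := rfl
  rw [hdd]
  apply List.map_congr_left
  intro t _
  rw [pvGetD_fold]
  rfl

theorem pvAlt_eq (s : String) :
    parse_column_allowlist_py_alt (some s)
      = (((PySem.Chars.splitOn s.toList [',']).filterMap pvPair).foldl pvStepP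
          PySem.Dict.empty).items := by
  rw [pvItems_fold]
  rfl


-- ===== VERDICT (by name: the statement is the Claim_ definition above) =====
theorem parse_column_allowlist_py_spec : Claim_equal_parse_column_allowlist_py := by
  intro raw _
  unfold Spec_parse_column_allowlist_py parse_column_allowlist_py
  match raw with
  | none => rfl
  | some s =>
    by_cases h : s.toList.isEmpty
    · have hs : s = "" := by
        have : s.toList = [] := by simpa using h
        cases s; simp_all
      subst hs
      simp only [h, if_true]
      rfl
    · simp only [h, if_false, Bool.false_eq_true]
      rw [pvFold_filterMap, pvAlt_eq]
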